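-- pv_equiv track=rewrite | github.com/amusictheorist/just_intonation_tools | main.py | par_to_parc
-- ===== SOURCE A (Python) =====
-- def par_to_parc(num):
--     if type(num) is not int:
--         return 'Invalid input, please enter a positive integer'
--
--     if num <= 0:
--         return 'Invalid input, please enter a positive integer'
--
--     if num % 2 != 0:
--         return num
--
--     else:
--         num //= 2
--         return par_to_parc(num)
-- ===== SOURCE B (Python) =====
-- def par_to_parc(num):
--     if type(num) is not int or num <= 0:
--         return 'Invalid input, please enter a positive integer'
--     while num % 2 == 0:
--         num //= 2
--     return num
-- ===== Notes on version B (the rewrite author's own statement) =====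
-- stated objective: simpler
-- what changed: Replaced A's tail recursion (a fresh call per stripped factor of two) with a single merged guard and an explicit while-loop that halves the number in place while it is even.
import Mathlib
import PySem

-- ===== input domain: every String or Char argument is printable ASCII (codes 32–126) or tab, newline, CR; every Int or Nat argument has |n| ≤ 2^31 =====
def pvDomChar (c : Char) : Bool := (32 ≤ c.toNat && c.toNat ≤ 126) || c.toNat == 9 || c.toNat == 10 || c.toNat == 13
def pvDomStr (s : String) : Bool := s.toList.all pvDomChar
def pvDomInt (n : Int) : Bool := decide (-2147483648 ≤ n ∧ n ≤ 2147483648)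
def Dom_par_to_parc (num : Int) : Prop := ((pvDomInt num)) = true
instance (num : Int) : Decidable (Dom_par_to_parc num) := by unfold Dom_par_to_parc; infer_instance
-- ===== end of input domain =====

-- B replaces A's tail recursion by one merged guard and an explicit while-loop (same values; objective: simpler).

-- ===== PORT A =====
-- A returns an error STRING (not an Int) for num <= 0; those inputs are outside Pre_ below,
-- and the port returns num there as a placeholder.
def par_to_parc (num : Int) : Int :=
  if num ≤ 0 then num                                -- Python: returns the error string here
  else if PySem.Int.mod num 2 ≠ 0 then num
  else par_to_parc (PySem.Int.floordiv num 2)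
termination_by num.toNat
decreasing_by
  simp only [PySem.Int.floordiv, Int.fdiv_eq_ediv]
  omega

-- ===== PORT B =====
-- the `while num % 2 == 0: num //= 2` loop; the `0 < num` conjunct is a totality guard only
-- (the Python loop is only reached with num > 0)
def pvOddLoop (num : Int) : Int :=
  if 0 < num ∧ PySem.Int.mod num 2 = 0 then pvOddLoop (PySem.Int.floordiv num 2)
  else num
termination_by num.toNat
decreasing_by
  simp only [PySem.Int.floordiv, Int.fdiv_eq_ediv]
  omega

def par_to_parc_alt (num : Int) : Int :=
  if num ≤ 0 then num                                -- Python: returns the error string here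
  else pvOddLoop num

-- ===== PRECONDITION & SPEC =====
-- Pre_ excludes num <= 0, where A (and B) return an error string, which is not a value of the declared Int type.
def Pre_par_to_parc (num : Int) : Prop := 1 ≤ num
instance (num : Int) : Decidable (Pre_par_to_parc num) := by unfold Pre_par_to_parc; infer_instance

def pvWitness_par_to_parc : Int := (12)

def Spec_par_to_parc (num : Int) (out : Int) : Prop := out = par_to_parc_alt num
instance (num : Int) (out : Int) : Decidable (Spec_par_to_parc num out) := by unfold Spec_par_to_parc; infer_instance

-- ===== CLAIM (what is proved, stated in full; the proofs are below) =====
def Claim_equal_par_to_parc : Prop := ∀ (num : Int), Dom_par_to_parc num → Pre_par_to_parc num → Spec_par_to_parc num (par_to_parc num)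

-- ===== LEMMAS AND PROOFS =====

theorem par_to_parc_eq_loop (n : Nat) (num : Int) (h : 0 < num) (hn : num.toNat = n) :
    par_to_parc num = pvOddLoop num := by
  induction n using Nat.strong_induction_on generalizing num with
  | _ n ih =>
    rw [par_to_parc.eq_def, pvOddLoop.eq_def]
    have h0 : ¬ num ≤ 0 := by omega
    by_cases he : PySem.Int.mod num 2 = 0
    · have hlt : (PySem.Int.floordiv num 2).toNat < n := by
        simp only [PySem.Int.floordiv, Int.fdiv_eq_ediv] at *
        omega
      have hpos : 0 < PySem.Int.floordiv num 2 := by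
        simp only [PySem.Int.floordiv, PySem.Int.mod, Int.fdiv_eq_ediv, Int.fmod_eq_emod] at *
        omega
      rw [if_neg h0, if_neg (not_not_intro he), if_pos ⟨h, he⟩]
      exact ih _ hlt _ hpos rfl
    · rw [if_neg h0, if_pos he, if_neg (fun hc => he hc.2)]

-- ===== VERDICT (by name: the statement is the Claim_ definition above) =====
theorem par_to_parc_spec : Claim_equal_par_to_parc := by
  intro num _ hpre
  unfold Spec_par_to_parc par_to_parc_alt
  have h : 0 < num := hpre
  rw [if_neg (by omega)]
  exact par_to_parc_eq_loop num.toNat num h rfl
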